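-- pv_equiv track=rewrite | github.com/echo-xiao/leetcode-journey | Problems/3965_earliest-finish-time-for-land-and-water-rides-i/solution_1.py | earliestFinishTime
-- ===== SOURCE A (Python) =====
-- from typing import List
--
-- def earliestFinishTime(landStartTime: List[int], landDuration: List[int], waterStartTime: List[int], waterDuration: List[int]) -> int:
--
--     best = float('inf')
--     for i in range(0, len(landStartTime)):
--         for j in range(0, len(waterStartTime)):
--             landFinishTime = landStartTime[i] + landDuration[i]
--             waterFinishTime = waterStartTime[j] + waterDuration[j]
--
--             landFirstWaterSecond = max(landFinishTime, waterStartTime[j])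
--             optA = landFirstWaterSecond + waterDuration[j]
--
--             waterFirstLandSecond = max(waterFinishTime, landStartTime[i])
--             optB = waterFirstLandSecond + landDuration[i]
--
--             curr = min(optA, optB)
--             best = min(best, curr)
--     return best
-- ===== SOURCE B (Python) =====
-- def earliestFinishTime(landStartTime, landDuration, waterStartTime, waterDuration):
--     bestLand = min(s + d for s, d in zip(landStartTime, landDuration))
--     bestWater = min(s + d for s, d in zip(waterStartTime, waterDuration))
--     optA = min(max(bestLand, s) + d for s, d in zip(waterStartTime, waterDuration))
--     optB = min(max(bestWater, s) + d for s, d in zip(landStartTime, landDuration))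
--     return min(optA, optB)
-- ===== Notes on version B (the rewrite author's own statement) =====
-- stated objective: faster
-- what changed: Replaced the nested loop over all land/water pairs by four independent single passes: by monotonicity of max, only the minimal first-ride finish time matters, so B takes min land finish over waters and min water finish over lands.
-- outside the precondition, e.g. on earliestFinishTime([], [], [], []): A returns inf, B raises ValueError
import Mathlib
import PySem

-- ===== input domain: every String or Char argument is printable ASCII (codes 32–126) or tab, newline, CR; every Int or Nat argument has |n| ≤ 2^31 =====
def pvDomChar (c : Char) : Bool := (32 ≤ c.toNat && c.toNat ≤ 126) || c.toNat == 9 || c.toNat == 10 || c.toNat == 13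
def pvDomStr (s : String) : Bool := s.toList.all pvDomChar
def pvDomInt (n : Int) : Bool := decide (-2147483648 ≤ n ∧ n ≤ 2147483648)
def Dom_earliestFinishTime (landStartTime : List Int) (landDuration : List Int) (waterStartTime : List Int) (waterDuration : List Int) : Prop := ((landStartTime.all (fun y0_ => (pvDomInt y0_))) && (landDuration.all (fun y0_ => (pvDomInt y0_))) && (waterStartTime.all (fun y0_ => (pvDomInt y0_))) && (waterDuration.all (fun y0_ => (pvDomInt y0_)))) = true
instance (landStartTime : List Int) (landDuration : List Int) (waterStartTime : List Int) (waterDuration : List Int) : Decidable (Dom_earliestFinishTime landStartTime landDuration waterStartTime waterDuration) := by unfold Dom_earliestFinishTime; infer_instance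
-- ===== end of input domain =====

-- B replaces A's nested loop over all land/water pairs by four single passes
-- (min land-finish over waters and min water-finish over lands); objective: faster (asymptotic).

-- ===== PORT A =====
-- A starts 'best' at float('inf'); ported as an Option Int accumulator (none = inf).
-- Outside Pre_ (an empty list) A would return the float inf, which is not an int;
-- there the port returns best.getD 0.
def earliestFinishTime (landStartTime : List Int) (landDuration : List Int) (waterStartTime : List Int) (waterDuration : List Int) : Int :=
  let best : Option Int :=
    (PySem.List.pyRange 0 (landStartTime.length : Int) 1).foldl (fun best i =>
      (PySem.List.pyRange 0 (waterStartTime.length : Int) 1).foldl (fun best j =>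
        let landFinishTime := PySem.List.pyGetD landStartTime i 0 + PySem.List.pyGetD landDuration i 0
        let waterFinishTime := PySem.List.pyGetD waterStartTime j 0 + PySem.List.pyGetD waterDuration j 0
        let landFirstWaterSecond := max landFinishTime (PySem.List.pyGetD waterStartTime j 0)
        let optA := landFirstWaterSecond + PySem.List.pyGetD waterDuration j 0
        let waterFirstLandSecond := max waterFinishTime (PySem.List.pyGetD landStartTime i 0)
        let optB := waterFirstLandSecond + PySem.List.pyGetD landDuration i 0
        let curr := min optA optB
        some (match best with | none => curr | some b => min b curr)) best) none
  best.getD 0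

-- ===== PORT B =====
-- min(... for s, d in zip(xs, ys)) ported via PySem.List.min? on the mapped zip;
-- .getD 0 covers only the empty case (Python's min would raise ValueError there, outside Pre_).
def earliestFinishTime_alt (landStartTime : List Int) (landDuration : List Int) (waterStartTime : List Int) (waterDuration : List Int) : Int :=
  let bestLand := (PySem.List.min? ((landStartTime.zip landDuration).map (fun p => p.1 + p.2)) (fun x => x)).getD 0
  let bestWater := (PySem.List.min? ((waterStartTime.zip waterDuration).map (fun p => p.1 + p.2)) (fun x => x)).getD 0
  let optA := (PySem.List.min? ((waterStartTime.zip waterDuration).map (fun p => max bestLand p.1 + p.2)) (fun x => x)).getD 0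
  let optB := (PySem.List.min? ((landStartTime.zip landDuration).map (fun p => max bestWater p.1 + p.2)) (fun x => x)).getD 0
  min optA optB

-- ===== PRECONDITION & SPEC =====
-- Pre_ excludes (a) an empty landStartTime or waterStartTime, where A returns the float
-- inf instead of an int (and B's min() raises), and (b) a duration list shorter than its
-- start list, where A raises IndexError.
def Pre_earliestFinishTime (landStartTime : List Int) (landDuration : List Int) (waterStartTime : List Int) (waterDuration : List Int) : Prop :=
  landStartTime ≠ [] ∧ waterStartTime ≠ [] ∧ landStartTime.length ≤ landDuration.length ∧ waterStartTime.length ≤ waterDuration.length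
instance (landStartTime : List Int) (landDuration : List Int) (waterStartTime : List Int) (waterDuration : List Int) : Decidable (Pre_earliestFinishTime landStartTime landDuration waterStartTime waterDuration) := by unfold Pre_earliestFinishTime; infer_instance

def pvWitness_earliestFinishTime : List Int × List Int × List Int × List Int := ([2, 8], [4, 1], [5], [3])

def Spec_earliestFinishTime (landStartTime : List Int) (landDuration : List Int) (waterStartTime : List Int) (waterDuration : List Int) (out : Int) : Prop := out = earliestFinishTime_alt landStartTime landDuration waterStartTime waterDuration
instance (landStartTime : List Int) (landDuration : List Int) (waterStartTime : List Int) (waterDuration : List Int) (out : Int) : Decidable (Spec_earliestFinishTime landStartTime landDuration waterStartTime waterDuration out) := by unfold Spec_earliestFinishTime; infer_instance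

-- ===== CLAIM =====
def Claim_equal_earliestFinishTime : Prop := ∀ (landStartTime : List Int) (landDuration : List Int) (waterStartTime : List Int) (waterDuration : List Int), Dom_earliestFinishTime landStartTime landDuration waterStartTime waterDuration → Pre_earliestFinishTime landStartTime landDuration waterStartTime waterDuration → Spec_earliestFinishTime landStartTime landDuration waterStartTime waterDuration (earliestFinishTime landStartTime landDuration waterStartTime waterDuration)

-- ===== LEMMAS AND PROOFS =====

-- the value A computes for the pair (p, q) = ((landStart, landDur), (waterStart, waterDur))
def pvCurr (p q : Int × Int) : Int :=
  min (max (p.1 + p.2) q.1 + q.2) (max (q.1 + q.2) p.1 + p.2)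

-- an index loop 'for k in range(len(xs))' reading xs[k] and ys[k] is a loop over zip xs ys
theorem pv_foldl_range_getD_zip {α : Type} : ∀ (xs ys : List Int) (F : α → Int → Int → α) (init : α), xs.length ≤ ys.length →
    (List.range xs.length).foldl (fun acc k => F acc (xs.getD k 0) (ys.getD k 0)) init
      = (xs.zip ys).foldl (fun acc p => F acc p.1 p.2) init := by
  intro xs
  induction xs with
  | nil => intro ys F init h; simp
  | cons x xs ih =>
    intro ys F init h
    cases ys with
    | nil => simp at h
    | cons y ys =>
      simp only [List.length_cons, List.range_succ_eq_map, List.foldl_cons, List.foldl_map,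
        List.zip_cons_cons, List.getD_cons_zero, List.getD_cons_succ]
      exact ih ys F (F init x y) (by simpa using h)

theorem pv_foldl_pyRange_zipPair {α : Type} (xs ys : List Int) (F : α → Int → Int → α) (init : α) (h : xs.length ≤ ys.length) :
    (PySem.List.pyRange 0 (xs.length : Int) 1).foldl (fun acc i => F acc (PySem.List.pyGetD xs i 0) (PySem.List.pyGetD ys i 0)) init
      = (xs.zip ys).foldl (fun acc p => F acc p.1 p.2) init := by
  rw [PySem.List.pyRange_one]
  simp only [List.foldl_map, sub_zero, Int.toNat_natCast, zero_add, PySem.List.pyGetD_natCast]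
  exact pv_foldl_range_getD_zip xs ys F init h

-- nested option-min fold = option-min fold over the flattened list of pair values
theorem pv_foldl_foldl_flat {α β : Type} (g : α → β → Int) (P : List α) (Q : List β) :
    ∀ (b0 : Option Int),
    P.foldl (fun b p => Q.foldl (fun b q => some (match b with | none => g p q | some v => min v (g p q))) b) b0
      = (P.flatMap (fun p => Q.map (g p))).foldl (fun b x => some (match b with | none => x | some v => min v x)) b0 := by
  induction P with
  | nil => intro b0; simp
  | cons p P ih =>
    intro b0
    simp only [List.foldl_cons, List.flatMap_cons, List.foldl_append, List.foldl_map]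
    exact ih _

theorem pv_foldl_mstep_some (L : List Int) : ∀ (v : Int),
    L.foldl (fun b x => some (match b with | none => x | some v => min v x)) (some v)
      = some (L.foldl min v) := by
  induction L with
  | nil => intro v; rfl
  | cons x t ih => intro v; simpa using ih (min v x)

theorem pv_lmin_cons (x : Int) (t : List Int) :
    (x :: t).foldl (fun b x => some (match b with | none => x | some v => min v x)) none
      = some (t.foldl min x) := by
  simpa using pv_foldl_mstep_some t x

theorem earliestFinishTime_spec_aux (ls ld ws wd : List Int)
    (h1 : ls ≠ []) (h2 : ws ≠ []) (h3 : ls.length ≤ ld.length) (h4 : ws.length ≤ wd.length) :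
    earliestFinishTime ls ld ws wd = earliestFinishTime_alt ls ld ws wd := by
  -- step 1: A's nested index loops = an option-min fold over the flattened list of pair values
  have hA : earliestFinishTime ls ld ws wd
      = (((ls.zip ld).flatMap (fun p => (ws.zip wd).map (pvCurr p))).foldl
          (fun b x => some (match b with | none => x | some v => min v x)) none).getD 0 := by
    have s1 := pv_foldl_pyRange_zipPair ls ld
      (F := fun (acc : Option Int) (a b : Int) =>
        (PySem.List.pyRange 0 (ws.length : Int) 1).foldl (fun best j =>
          some (match best with
            | none => min (max (a + b) (PySem.List.pyGetD ws j 0) + PySem.List.pyGetD wd j 0)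
                (max (PySem.List.pyGetD ws j 0 + PySem.List.pyGetD wd j 0) a + b)
            | some bb => min bb (min (max (a + b) (PySem.List.pyGetD ws j 0) + PySem.List.pyGetD wd j 0)
                (max (PySem.List.pyGetD ws j 0 + PySem.List.pyGetD wd j 0) a + b)))) acc)
      (init := (none : Option Int)) h3
    have s2 : (ls.zip ld).foldl (fun (acc : Option Int) p =>
        (PySem.List.pyRange 0 (ws.length : Int) 1).foldl (fun best j =>
          some (match best with
            | none => min (max (p.1 + p.2) (PySem.List.pyGetD ws j 0) + PySem.List.pyGetD wd j 0)
                (max (PySem.List.pyGetD ws j 0 + PySem.List.pyGetD wd j 0) p.1 + p.2)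
            | some bb => min bb (min (max (p.1 + p.2) (PySem.List.pyGetD ws j 0) + PySem.List.pyGetD wd j 0)
                (max (PySem.List.pyGetD ws j 0 + PySem.List.pyGetD wd j 0) p.1 + p.2)))) acc) none
        = (ls.zip ld).foldl (fun (acc : Option Int) p =>
            (ws.zip wd).foldl (fun b q =>
              some (match b with | none => pvCurr p q | some v => min v (pvCurr p q))) acc) none := by
      refine PySem.List.foldl_congr_mem _ _ _ none (fun acc p _ => ?_)
      exact pv_foldl_pyRange_zipPair ws wd
        (F := fun (acc : Option Int) (c dd : Int) =>
          some (match acc with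
            | none => min (max (p.1 + p.2) c + dd) (max (c + dd) p.1 + p.2)
            | some bb => min bb (min (max (p.1 + p.2) c + dd) (max (c + dd) p.1 + p.2))))
        (init := acc) h4
    have s3 := pv_foldl_foldl_flat pvCurr (ls.zip ld) (ws.zip wd) none
    show ((PySem.List.pyRange 0 (ls.length : Int) 1).foldl _ none).getD 0 = _
    exact congrArg (Option.getD · 0) ((s1.trans s2).trans s3)
  -- step 2: name B's four one-pass minima and their characterizations
  have hLPne : ls.zip ld ≠ [] := by
    cases ls with
    | nil => exact absurd rfl h1
    | cons x xs =>
      cases ld with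
      | nil => simp at h3
      | cons y ys => simp
  have hWQne : ws.zip wd ≠ [] := by
    cases ws with
    | nil => exact absurd rfl h2
    | cons x xs =>
      cases wd with
      | nil => simp at h4
      | cons y ys => simp
  obtain ⟨BL, hBL⟩ : ∃ v, PySem.List.min? ((ls.zip ld).map (fun p => p.1 + p.2)) (fun x => x) = some v := by
    cases h : PySem.List.min? ((ls.zip ld).map (fun p => p.1 + p.2)) (fun x => x) with
    | none => rw [PySem.List.min?_eq_none_iff] at h; simp [hLPne] at h
    | some v => exact ⟨v, rfl⟩
  obtain ⟨BW, hBW⟩ : ∃ v, PySem.List.min? ((ws.zip wd).map (fun p => p.1 + p.2)) (fun x => x) = some v := by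
    cases h : PySem.List.min? ((ws.zip wd).map (fun p => p.1 + p.2)) (fun x => x) with
    | none => rw [PySem.List.min?_eq_none_iff] at h; simp [hWQne] at h
    | some v => exact ⟨v, rfl⟩
  obtain ⟨oA, hoA⟩ : ∃ v, PySem.List.min? ((ws.zip wd).map (fun p => max BL p.1 + p.2)) (fun x => x) = some v := by
    cases h : PySem.List.min? ((ws.zip wd).map (fun p => max BL p.1 + p.2)) (fun x => x) with
    | none => rw [PySem.List.min?_eq_none_iff] at h; simp [hWQne] at h
    | some v => exact ⟨v, rfl⟩
  obtain ⟨oB, hoB⟩ : ∃ v, PySem.List.min? ((ls.zip ld).map (fun p => max BW p.1 + p.2)) (fun x => x) = some v := by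
    cases h : PySem.List.min? ((ls.zip ld).map (fun p => max BW p.1 + p.2)) (fun x => x) with
    | none => rw [PySem.List.min?_eq_none_iff] at h; simp [hLPne] at h
    | some v => exact ⟨v, rfl⟩
  have hB : earliestFinishTime_alt ls ld ws wd = min oA oB := by
    simp only [earliestFinishTime_alt, hBL, Option.getD_some, hBW, hoA, hoB]
  -- characterizations
  have hBLmin := PySem.List.min?_isMin hBL
  have hBWmin := PySem.List.min?_isMin hBW
  have hoAmin := PySem.List.min?_isMin hoA
  have hoBmin := PySem.List.min?_isMin hoB
  obtain ⟨pL, hpL, hpLv⟩ := List.mem_map.mp (PySem.List.min?_mem hBL)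
  obtain ⟨qW, hqW, hqWv⟩ := List.mem_map.mp (PySem.List.min?_mem hBW)
  obtain ⟨qA, hqA, hqAv⟩ := List.mem_map.mp (PySem.List.min?_mem hoA)
  obtain ⟨pB, hpB, hpBv⟩ := List.mem_map.mp (PySem.List.min?_mem hoB)
  -- step 3: the flattened list, its running minimum M, and its characterization
  set big : List Int := (ls.zip ld).flatMap (fun p => (ws.zip wd).map (pvCurr p)) with hbigdef
  have hbigne : big ≠ [] := by
    obtain ⟨p0, t, hlp⟩ := List.exists_cons_of_ne_nil hLPne
    obtain ⟨q0, u, hwq⟩ := List.exists_cons_of_ne_nil hWQne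
    simp [hbigdef, hlp, hwq]
  obtain ⟨c, T, hbig⟩ := List.exists_cons_of_ne_nil hbigne
  rw [hA, hB]
  show ((big.foldl (fun b x => some (match b with | none => x | some v => min v x)) none).getD 0) = min oA oB
  rw [hbig, pv_lmin_cons, Option.getD_some]
  have hMmem : T.foldl min c ∈ big := by
    rw [hbig]
    rcases PySem.List.foldl_min_mem T c with h | h
    · rw [h]; exact List.mem_cons_self ..
    · exact List.mem_cons_of_mem _ h
  have hMle : ∀ y ∈ big, T.foldl min c ≤ y := by
    intro y hy
    rw [hbig] at hy
    rcases List.mem_cons.mp hy with h | h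
    · rw [h]; exact (PySem.List.foldl_min_le T c).1
    · exact (PySem.List.foldl_min_le T c).2 y h
  -- (i) min oA oB is a lower bound of big
  have hlow : ∀ y ∈ big, min oA oB ≤ y := by
    intro y hy
    rw [hbigdef] at hy
    obtain ⟨p, hp, hy'⟩ := List.mem_flatMap.mp hy
    obtain ⟨q, hq, rfl⟩ := List.mem_map.mp hy'
    have h5 : BL ≤ p.1 + p.2 := hBLmin _ (List.mem_map_of_mem hp)
    have h6 : BW ≤ q.1 + q.2 := hBWmin _ (List.mem_map_of_mem hq)
    have h7 : oA ≤ max BL q.1 + q.2 := hoAmin _ (List.mem_map_of_mem hq)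
    have h8 : oB ≤ max BW p.1 + p.2 := hoBmin _ (List.mem_map_of_mem hp)
    have h9 : oA ≤ max (p.1 + p.2) q.1 + q.2 :=
      le_trans h7 (add_le_add (max_le_max h5 le_rfl) le_rfl)
    have h10 : oB ≤ max (q.1 + q.2) p.1 + p.2 :=
      le_trans h8 (add_le_add (max_le_max h6 le_rfl) le_rfl)
    exact min_le_min h9 h10
  -- (ii) min oA oB is attained in big
  have hmem : min oA oB ∈ big := by
    by_cases hAB : oA ≤ oB
    · have hcurr : pvCurr pL qA = oA := by
        have hb : oB ≤ max (qA.1 + qA.2) pL.1 + pL.2 := by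
          have h6 : BW ≤ qA.1 + qA.2 := hBWmin _ (List.mem_map_of_mem hqA)
          have h8 : oB ≤ max BW pL.1 + pL.2 := hoBmin _ (List.mem_map_of_mem hpL)
          exact le_trans h8 (add_le_add (max_le_max h6 le_rfl) le_rfl)
        unfold pvCurr
        rw [hpLv, hqAv]
        exact min_eq_left (le_trans hAB hb)
      rw [min_eq_left hAB, hbigdef]
      exact List.mem_flatMap.mpr ⟨pL, hpL, List.mem_map.mpr ⟨qA, hqA, hcurr⟩⟩
    · have hAB' : oB ≤ oA := le_of_not_ge hAB
      have hcurr : pvCurr pB qW = oB := by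
        have ha : oA ≤ max (pB.1 + pB.2) qW.1 + qW.2 := by
          have h5 : BL ≤ pB.1 + pB.2 := hBLmin _ (List.mem_map_of_mem hpB)
          have h7 : oA ≤ max BL qW.1 + qW.2 := hoAmin _ (List.mem_map_of_mem hqW)
          exact le_trans h7 (add_le_add (max_le_max h5 le_rfl) le_rfl)
        unfold pvCurr
        rw [hqWv, hpBv]
        exact min_eq_right (le_trans hAB' ha)
      rw [min_eq_right hAB', hbigdef]
      exact List.mem_flatMap.mpr ⟨pB, hpB, List.mem_map.mpr ⟨qW, hqW, hcurr⟩⟩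
  exact le_antisymm (hMle _ hmem) (hlow _ hMmem)

-- ===== VERDICT =====
theorem earliestFinishTime_spec : Claim_equal_earliestFinishTime := by
  intro ls ld ws wd _hd hpre
  unfold Spec_earliestFinishTime
  exact earliestFinishTime_spec_aux ls ld ws wd hpre.1 hpre.2.1 hpre.2.2.1 hpre.2.2.2
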